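-- pv_equiv track=rewrite | github.com/thepayloadbay/thetadata | simsearch/simsearch_ablation.py | classify_features
-- ===== SOURCE A (Python) =====
-- def classify_features(feature_cols: list[str]) -> dict[str, list[str]]:
--     """Group features into semantic categories."""
--     groups = {}
--     for c in feature_cols:
--         if c.startswith("spx_prev_return"):
--             groups.setdefault("spx_returns", []).append(c)
--         elif c.startswith("spx_prev_") and "return" not in c:
--             groups.setdefault("spx_candle", []).append(c)
--         elif c.startswith("spx_gap"):
--             groups.setdefault("spx_gap", []).append(c)
--         elif c.startswith(("spx_above", "spx_rsi", "spx_dist")):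
--             groups.setdefault("spx_trend", []).append(c)
--         elif c.startswith(("vix_prev", "vix_percentile", "vix_zscore", "vix_spx")):
--             groups.setdefault("vix_features", []).append(c)
--         elif c.startswith("realized_vol"):
--             groups.setdefault("realized_vol", []).append(c)
--         elif c.startswith(("dow", "month", "is_", "days_to")):
--             groups.setdefault("calendar", []).append(c)
--         elif c.startswith("prev_"):
--             groups.setdefault("intraday_shape", []).append(c)
--         elif c.startswith(("vix1d", "vix9d", "vvix")):
--             groups.setdefault("vix_term", []).append(c)
--         elif c.startswith(("net_gex", "call_gex", "put_gex", "net_vex", "gex_")):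
--             groups.setdefault("gex_features", []).append(c)
--         elif c.startswith(("iv_", "gamma_")):
--             groups.setdefault("iv_greeks", []).append(c)
--         elif c.startswith(("put_call", "total_oi", "call_wall", "put_wall")):
--             groups.setdefault("oi_positioning", []).append(c)
--         else:
--             groups.setdefault("other", []).append(c)
--     return groups
-- ===== SOURCE B (Python) =====
-- RULES = [
--     ("spx_returns", lambda c: c.startswith("spx_prev_return")),
--     ("spx_candle", lambda c: c.startswith("spx_prev_") and "return" not in c),
--     ("spx_gap", lambda c: c.startswith("spx_gap")),
--     ("spx_trend", lambda c: c.startswith(("spx_above", "spx_rsi", "spx_dist"))),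
--     ("vix_features", lambda c: c.startswith(("vix_prev", "vix_percentile", "vix_zscore", "vix_spx"))),
--     ("realized_vol", lambda c: c.startswith("realized_vol")),
--     ("calendar", lambda c: c.startswith(("dow", "month", "is_", "days_to"))),
--     ("intraday_shape", lambda c: c.startswith("prev_")),
--     ("vix_term", lambda c: c.startswith(("vix1d", "vix9d", "vvix"))),
--     ("gex_features", lambda c: c.startswith(("net_gex", "call_gex", "put_gex", "net_vex", "gex_"))),
--     ("iv_greeks", lambda c: c.startswith(("iv_", "gamma_"))),
--     ("oi_positioning", lambda c: c.startswith(("put_call", "total_oi", "call_wall", "put_wall"))),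
-- ]
--
--
-- def _category(c: str) -> str:
--     return next((name for name, pred in RULES if pred(c)), "other")
--
--
-- def classify_features(feature_cols: list[str]) -> dict[str, list[str]]:
--     """Group features into semantic categories."""
--     cats = [_category(c) for c in feature_cols]
--     return {k: [c for c, g in zip(feature_cols, cats) if g == k]
--             for k in dict.fromkeys(cats)}
-- ===== Notes on version B (the rewrite author's own statement) =====
-- stated objective: alternative
-- what changed: Staged grouping instead of A's one-pass setdefault/append accumulator: B computes each column's category once (via an ordered rule table), dedups the categories in first-occurrence order with dict.fromkeys, and builds the result with a dict comprehension that filters the columns per category.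
import Mathlib
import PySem

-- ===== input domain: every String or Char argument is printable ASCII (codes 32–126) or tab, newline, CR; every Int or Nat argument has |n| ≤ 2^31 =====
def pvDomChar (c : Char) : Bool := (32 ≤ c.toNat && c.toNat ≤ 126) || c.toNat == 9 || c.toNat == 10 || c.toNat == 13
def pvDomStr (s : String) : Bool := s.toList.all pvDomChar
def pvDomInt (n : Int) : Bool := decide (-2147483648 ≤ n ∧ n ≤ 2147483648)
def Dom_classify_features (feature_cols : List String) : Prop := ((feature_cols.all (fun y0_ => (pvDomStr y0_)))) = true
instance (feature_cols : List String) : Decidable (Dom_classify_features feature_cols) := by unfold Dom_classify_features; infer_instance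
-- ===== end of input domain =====

-- B replaces A's one-pass dict accumulation by staged passes: categorise, dedup, filter per category (objective: alternative, same result).

-- ===== PORT A =====
-- groups.setdefault(k, []).append(c)  ≡  d.modify k [] (· ++ [c])  (PySem.Dict, insertion order kept)
-- the body of A's for-loop (the if/elif chain), as a named step function
def classifyStepA (groups : PySem.Dict String (List String)) (c : String) : PySem.Dict String (List String) :=
    if PySem.Str.startswith c "spx_prev_return" then groups.modify "spx_returns" [] (· ++ [c])
    else if PySem.Str.startswith c "spx_prev_" && !PySem.Str.isIn "return" c then groups.modify "spx_candle" [] (· ++ [c])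
    else if PySem.Str.startswith c "spx_gap" then groups.modify "spx_gap" [] (· ++ [c])
    else if PySem.Str.startswith c "spx_above" || PySem.Str.startswith c "spx_rsi" || PySem.Str.startswith c "spx_dist" then groups.modify "spx_trend" [] (· ++ [c])
    else if PySem.Str.startswith c "vix_prev" || PySem.Str.startswith c "vix_percentile" || PySem.Str.startswith c "vix_zscore" || PySem.Str.startswith c "vix_spx" then groups.modify "vix_features" [] (· ++ [c])
    else if PySem.Str.startswith c "realized_vol" then groups.modify "realized_vol" [] (· ++ [c])
    else if PySem.Str.startswith c "dow" || PySem.Str.startswith c "month" || PySem.Str.startswith c "is_" || PySem.Str.startswith c "days_to" then groups.modify "calendar" [] (· ++ [c])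
    else if PySem.Str.startswith c "prev_" then groups.modify "intraday_shape" [] (· ++ [c])
    else if PySem.Str.startswith c "vix1d" || PySem.Str.startswith c "vix9d" || PySem.Str.startswith c "vvix" then groups.modify "vix_term" [] (· ++ [c])
    else if PySem.Str.startswith c "net_gex" || PySem.Str.startswith c "call_gex" || PySem.Str.startswith c "put_gex" || PySem.Str.startswith c "net_vex" || PySem.Str.startswith c "gex_" then groups.modify "gex_features" [] (· ++ [c])
    else if PySem.Str.startswith c "iv_" || PySem.Str.startswith c "gamma_" then groups.modify "iv_greeks" [] (· ++ [c])
    else if PySem.Str.startswith c "put_call" || PySem.Str.startswith c "total_oi" || PySem.Str.startswith c "call_wall" || PySem.Str.startswith c "put_wall" then groups.modify "oi_positioning" [] (· ++ [c])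
    else groups.modify "other" [] (· ++ [c])

def classify_features (feature_cols : List String) : List (String × List String) :=
  (feature_cols.foldl classifyStepA (PySem.Dict.empty (κ := String))).items

-- ===== PORT B =====
-- the ordered rule table of Source B: (category, predicate) pairs, first match wins
def pvRules : List (String × (String → Bool)) :=
  [ ("spx_returns", fun c => PySem.Str.startswith c "spx_prev_return"),
    ("spx_candle", fun c => PySem.Str.startswith c "spx_prev_" && !PySem.Str.isIn "return" c),
    ("spx_gap", fun c => PySem.Str.startswith c "spx_gap"),
    ("spx_trend", fun c => PySem.Str.startswith c "spx_above" || PySem.Str.startswith c "spx_rsi" || PySem.Str.startswith c "spx_dist"),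
    ("vix_features", fun c => PySem.Str.startswith c "vix_prev" || PySem.Str.startswith c "vix_percentile" || PySem.Str.startswith c "vix_zscore" || PySem.Str.startswith c "vix_spx"),
    ("realized_vol", fun c => PySem.Str.startswith c "realized_vol"),
    ("calendar", fun c => PySem.Str.startswith c "dow" || PySem.Str.startswith c "month" || PySem.Str.startswith c "is_" || PySem.Str.startswith c "days_to"),
    ("intraday_shape", fun c => PySem.Str.startswith c "prev_"),
    ("vix_term", fun c => PySem.Str.startswith c "vix1d" || PySem.Str.startswith c "vix9d" || PySem.Str.startswith c "vvix"),
    ("gex_features", fun c => PySem.Str.startswith c "net_gex" || PySem.Str.startswith c "call_gex" || PySem.Str.startswith c "put_gex" || PySem.Str.startswith c "net_vex" || PySem.Str.startswith c "gex_"),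
    ("iv_greeks", fun c => PySem.Str.startswith c "iv_" || PySem.Str.startswith c "gamma_"),
    ("oi_positioning", fun c => PySem.Str.startswith c "put_call" || PySem.Str.startswith c "total_oi" || PySem.Str.startswith c "call_wall" || PySem.Str.startswith c "put_wall") ]

-- Source B's _category: first matching rule's name, default "other"
def pvCategory (c : String) : String :=
  ((pvRules.find? (fun r => r.2 c)).map (·.1)).getD "other"

-- staged grouping: categorise every column, dedup categories (dict.fromkeys order), filter columns per category
def classify_features_alt (feature_cols : List String) : List (String × List String) :=
  let cats := feature_cols.map pvCategory
  (PySem.List.dedup cats).map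
    (fun k => (k, ((feature_cols.zip cats).filter (fun p => p.2 == k)).map (·.1)))

-- ===== PRECONDITION & SPEC =====
def Spec_classify_features (feature_cols : List String) (out : List (String × List String)) : Prop := out = classify_features_alt feature_cols
instance (feature_cols : List String) (out : List (String × List String)) : Decidable (Spec_classify_features feature_cols out) := by unfold Spec_classify_features; infer_instance

-- ===== CLAIM (what is proved, stated in full; the proofs are below) =====
def Claim_equal_classify_features : Prop := ∀ (feature_cols : List String), Dom_classify_features feature_cols → Spec_classify_features feature_cols (classify_features feature_cols)

-- ===== LEMMAS AND PROOFS =====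
theorem findRule_pos (name : String) (pred : String → Bool) (rs : List (String × (String → Bool))) (c : String) (h : pred c = true) :
    List.find? (fun r => r.2 c) ((name, pred) :: rs) = some (name, pred) :=
  List.find?_cons_of_pos h

theorem findRule_neg (name : String) (pred : String → Bool) (rs : List (String × (String → Bool))) (c : String) (h : pred c = false) :
    List.find? (fun r => r.2 c) ((name, pred) :: rs) = List.find? (fun r => r.2 c) rs :=
  List.find?_cons_of_neg (fun hh => Bool.false_ne_true (h.symm.trans hh))

-- A's if/elif chain does the same dict update as one modify at Source B's _category of c
set_option maxHeartbeats 2000000 in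
theorem pvStep_eq (d : PySem.Dict String (List String)) (c : String) :
    classifyStepA d c = d.modify (pvCategory c) [] (· ++ [c]) := by
  unfold classifyStepA pvCategory pvRules
  cases _h1 : (PySem.Str.startswith c "spx_prev_return")
  case true =>
    rw [findRule_pos _ (fun c => PySem.Str.startswith c "spx_prev_return") _ _ _h1]
    rfl
  case false =>
    cases _h2 : (PySem.Str.startswith c "spx_prev_" && !PySem.Str.isIn "return" c)
    case true =>
      rw [findRule_neg _ (fun c => PySem.Str.startswith c "spx_prev_return") _ _ _h1]
      rw [findRule_pos _ (fun c => PySem.Str.startswith c "spx_prev_" && !PySem.Str.isIn "return" c) _ _ _h2]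
      rfl
    case false =>
      cases _h3 : (PySem.Str.startswith c "spx_gap")
      case true =>
        rw [findRule_neg _ (fun c => PySem.Str.startswith c "spx_prev_return") _ _ _h1]
        rw [findRule_neg _ (fun c => PySem.Str.startswith c "spx_prev_" && !PySem.Str.isIn "return" c) _ _ _h2]
        rw [findRule_pos _ (fun c => PySem.Str.startswith c "spx_gap") _ _ _h3]
        rfl
      case false =>
        cases _h4 : (PySem.Str.startswith c "spx_above" || PySem.Str.startswith c "spx_rsi" || PySem.Str.startswith c "spx_dist")
        case true =>
          rw [findRule_neg _ (fun c => PySem.Str.startswith c "spx_prev_return") _ _ _h1]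
          rw [findRule_neg _ (fun c => PySem.Str.startswith c "spx_prev_" && !PySem.Str.isIn "return" c) _ _ _h2]
          rw [findRule_neg _ (fun c => PySem.Str.startswith c "spx_gap") _ _ _h3]
          rw [findRule_pos _ (fun c => PySem.Str.startswith c "spx_above" || PySem.Str.startswith c "spx_rsi" || PySem.Str.startswith c "spx_dist") _ _ _h4]
          rfl
        case false =>
          cases _h5 : (PySem.Str.startswith c "vix_prev" || PySem.Str.startswith c "vix_percentile" || PySem.Str.startswith c "vix_zscore" || PySem.Str.startswith c "vix_spx")
          case true =>
            rw [findRule_neg _ (fun c => PySem.Str.startswith c "spx_prev_return") _ _ _h1]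
            rw [findRule_neg _ (fun c => PySem.Str.startswith c "spx_prev_" && !PySem.Str.isIn "return" c) _ _ _h2]
            rw [findRule_neg _ (fun c => PySem.Str.startswith c "spx_gap") _ _ _h3]
            rw [findRule_neg _ (fun c => PySem.Str.startswith c "spx_above" || PySem.Str.startswith c "spx_rsi" || PySem.Str.startswith c "spx_dist") _ _ _h4]
            rw [findRule_pos _ (fun c => PySem.Str.startswith c "vix_prev" || PySem.Str.startswith c "vix_percentile" || PySem.Str.startswith c "vix_zscore" || PySem.Str.startswith c "vix_spx") _ _ _h5]
            rfl
          case false =>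
            cases _h6 : (PySem.Str.startswith c "realized_vol")
            case true =>
              rw [findRule_neg _ (fun c => PySem.Str.startswith c "spx_prev_return") _ _ _h1]
              rw [findRule_neg _ (fun c => PySem.Str.startswith c "spx_prev_" && !PySem.Str.isIn "return" c) _ _ _h2]
              rw [findRule_neg _ (fun c => PySem.Str.startswith c "spx_gap") _ _ _h3]
              rw [findRule_neg _ (fun c => PySem.Str.startswith c "spx_above" || PySem.Str.startswith c "spx_rsi" || PySem.Str.startswith c "spx_dist") _ _ _h4]
              rw [findRule_neg _ (fun c => PySem.Str.startswith c "vix_prev" || PySem.Str.startswith c "vix_percentile" || PySem.Str.startswith c "vix_zscore" || PySem.Str.startswith c "vix_spx") _ _ _h5]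
              rw [findRule_pos _ (fun c => PySem.Str.startswith c "realized_vol") _ _ _h6]
              rfl
            case false =>
              cases _h7 : (PySem.Str.startswith c "dow" || PySem.Str.startswith c "month" || PySem.Str.startswith c "is_" || PySem.Str.startswith c "days_to")
              case true =>
                rw [findRule_neg _ (fun c => PySem.Str.startswith c "spx_prev_return") _ _ _h1]
                rw [findRule_neg _ (fun c => PySem.Str.startswith c "spx_prev_" && !PySem.Str.isIn "return" c) _ _ _h2]
                rw [findRule_neg _ (fun c => PySem.Str.startswith c "spx_gap") _ _ _h3]
                rw [findRule_neg _ (fun c => PySem.Str.startswith c "spx_above" || PySem.Str.startswith c "spx_rsi" || PySem.Str.startswith c "spx_dist") _ _ _h4]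
                rw [findRule_neg _ (fun c => PySem.Str.startswith c "vix_prev" || PySem.Str.startswith c "vix_percentile" || PySem.Str.startswith c "vix_zscore" || PySem.Str.startswith c "vix_spx") _ _ _h5]
                rw [findRule_neg _ (fun c => PySem.Str.startswith c "realized_vol") _ _ _h6]
                rw [findRule_pos _ (fun c => PySem.Str.startswith c "dow" || PySem.Str.startswith c "month" || PySem.Str.startswith c "is_" || PySem.Str.startswith c "days_to") _ _ _h7]
                rfl
              case false =>
                cases _h8 : (PySem.Str.startswith c "prev_")
                case true =>
                  rw [findRule_neg _ (fun c => PySem.Str.startswith c "spx_prev_return") _ _ _h1]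
                  rw [findRule_neg _ (fun c => PySem.Str.startswith c "spx_prev_" && !PySem.Str.isIn "return" c) _ _ _h2]
                  rw [findRule_neg _ (fun c => PySem.Str.startswith c "spx_gap") _ _ _h3]
                  rw [findRule_neg _ (fun c => PySem.Str.startswith c "spx_above" || PySem.Str.startswith c "spx_rsi" || PySem.Str.startswith c "spx_dist") _ _ _h4]
                  rw [findRule_neg _ (fun c => PySem.Str.startswith c "vix_prev" || PySem.Str.startswith c "vix_percentile" || PySem.Str.startswith c "vix_zscore" || PySem.Str.startswith c "vix_spx") _ _ _h5]
                  rw [findRule_neg _ (fun c => PySem.Str.startswith c "realized_vol") _ _ _h6]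
                  rw [findRule_neg _ (fun c => PySem.Str.startswith c "dow" || PySem.Str.startswith c "month" || PySem.Str.startswith c "is_" || PySem.Str.startswith c "days_to") _ _ _h7]
                  rw [findRule_pos _ (fun c => PySem.Str.startswith c "prev_") _ _ _h8]
                  rfl
                case false =>
                  cases _h9 : (PySem.Str.startswith c "vix1d" || PySem.Str.startswith c "vix9d" || PySem.Str.startswith c "vvix")
                  case true =>
                    rw [findRule_neg _ (fun c => PySem.Str.startswith c "spx_prev_return") _ _ _h1]
                    rw [findRule_neg _ (fun c => PySem.Str.startswith c "spx_prev_" && !PySem.Str.isIn "return" c) _ _ _h2]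
                    rw [findRule_neg _ (fun c => PySem.Str.startswith c "spx_gap") _ _ _h3]
                    rw [findRule_neg _ (fun c => PySem.Str.startswith c "spx_above" || PySem.Str.startswith c "spx_rsi" || PySem.Str.startswith c "spx_dist") _ _ _h4]
                    rw [findRule_neg _ (fun c => PySem.Str.startswith c "vix_prev" || PySem.Str.startswith c "vix_percentile" || PySem.Str.startswith c "vix_zscore" || PySem.Str.startswith c "vix_spx") _ _ _h5]
                    rw [findRule_neg _ (fun c => PySem.Str.startswith c "realized_vol") _ _ _h6]
                    rw [findRule_neg _ (fun c => PySem.Str.startswith c "dow" || PySem.Str.startswith c "month" || PySem.Str.startswith c "is_" || PySem.Str.startswith c "days_to") _ _ _h7]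
                    rw [findRule_neg _ (fun c => PySem.Str.startswith c "prev_") _ _ _h8]
                    rw [findRule_pos _ (fun c => PySem.Str.startswith c "vix1d" || PySem.Str.startswith c "vix9d" || PySem.Str.startswith c "vvix") _ _ _h9]
                    rfl
                  case false =>
                    cases _h10 : (PySem.Str.startswith c "net_gex" || PySem.Str.startswith c "call_gex" || PySem.Str.startswith c "put_gex" || PySem.Str.startswith c "net_vex" || PySem.Str.startswith c "gex_")
                    case true =>
                      rw [findRule_neg _ (fun c => PySem.Str.startswith c "spx_prev_return") _ _ _h1]
                      rw [findRule_neg _ (fun c => PySem.Str.startswith c "spx_prev_" && !PySem.Str.isIn "return" c) _ _ _h2]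
                      rw [findRule_neg _ (fun c => PySem.Str.startswith c "spx_gap") _ _ _h3]
                      rw [findRule_neg _ (fun c => PySem.Str.startswith c "spx_above" || PySem.Str.startswith c "spx_rsi" || PySem.Str.startswith c "spx_dist") _ _ _h4]
                      rw [findRule_neg _ (fun c => PySem.Str.startswith c "vix_prev" || PySem.Str.startswith c "vix_percentile" || PySem.Str.startswith c "vix_zscore" || PySem.Str.startswith c "vix_spx") _ _ _h5]
                      rw [findRule_neg _ (fun c => PySem.Str.startswith c "realized_vol") _ _ _h6]
                      rw [findRule_neg _ (fun c => PySem.Str.startswith c "dow" || PySem.Str.startswith c "month" || PySem.Str.startswith c "is_" || PySem.Str.startswith c "days_to") _ _ _h7]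
                      rw [findRule_neg _ (fun c => PySem.Str.startswith c "prev_") _ _ _h8]
                      rw [findRule_neg _ (fun c => PySem.Str.startswith c "vix1d" || PySem.Str.startswith c "vix9d" || PySem.Str.startswith c "vvix") _ _ _h9]
                      rw [findRule_pos _ (fun c => PySem.Str.startswith c "net_gex" || PySem.Str.startswith c "call_gex" || PySem.Str.startswith c "put_gex" || PySem.Str.startswith c "net_vex" || PySem.Str.startswith c "gex_") _ _ _h10]
                      rfl
                    case false =>
                      cases _h11 : (PySem.Str.startswith c "iv_" || PySem.Str.startswith c "gamma_")
                      case true =>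
                        rw [findRule_neg _ (fun c => PySem.Str.startswith c "spx_prev_return") _ _ _h1]
                        rw [findRule_neg _ (fun c => PySem.Str.startswith c "spx_prev_" && !PySem.Str.isIn "return" c) _ _ _h2]
                        rw [findRule_neg _ (fun c => PySem.Str.startswith c "spx_gap") _ _ _h3]
                        rw [findRule_neg _ (fun c => PySem.Str.startswith c "spx_above" || PySem.Str.startswith c "spx_rsi" || PySem.Str.startswith c "spx_dist") _ _ _h4]
                        rw [findRule_neg _ (fun c => PySem.Str.startswith c "vix_prev" || PySem.Str.startswith c "vix_percentile" || PySem.Str.startswith c "vix_zscore" || PySem.Str.startswith c "vix_spx") _ _ _h5]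
                        rw [findRule_neg _ (fun c => PySem.Str.startswith c "realized_vol") _ _ _h6]
                        rw [findRule_neg _ (fun c => PySem.Str.startswith c "dow" || PySem.Str.startswith c "month" || PySem.Str.startswith c "is_" || PySem.Str.startswith c "days_to") _ _ _h7]
                        rw [findRule_neg _ (fun c => PySem.Str.startswith c "prev_") _ _ _h8]
                        rw [findRule_neg _ (fun c => PySem.Str.startswith c "vix1d" || PySem.Str.startswith c "vix9d" || PySem.Str.startswith c "vvix") _ _ _h9]
                        rw [findRule_neg _ (fun c => PySem.Str.startswith c "net_gex" || PySem.Str.startswith c "call_gex" || PySem.Str.startswith c "put_gex" || PySem.Str.startswith c "net_vex" || PySem.Str.startswith c "gex_") _ _ _h10]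
                        rw [findRule_pos _ (fun c => PySem.Str.startswith c "iv_" || PySem.Str.startswith c "gamma_") _ _ _h11]
                        rfl
                      case false =>
                        cases _h12 : (PySem.Str.startswith c "put_call" || PySem.Str.startswith c "total_oi" || PySem.Str.startswith c "call_wall" || PySem.Str.startswith c "put_wall")
                        case true =>
                          rw [findRule_neg _ (fun c => PySem.Str.startswith c "spx_prev_return") _ _ _h1]
                          rw [findRule_neg _ (fun c => PySem.Str.startswith c "spx_prev_" && !PySem.Str.isIn "return" c) _ _ _h2]
                          rw [findRule_neg _ (fun c => PySem.Str.startswith c "spx_gap") _ _ _h3]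
                          rw [findRule_neg _ (fun c => PySem.Str.startswith c "spx_above" || PySem.Str.startswith c "spx_rsi" || PySem.Str.startswith c "spx_dist") _ _ _h4]
                          rw [findRule_neg _ (fun c => PySem.Str.startswith c "vix_prev" || PySem.Str.startswith c "vix_percentile" || PySem.Str.startswith c "vix_zscore" || PySem.Str.startswith c "vix_spx") _ _ _h5]
                          rw [findRule_neg _ (fun c => PySem.Str.startswith c "realized_vol") _ _ _h6]
                          rw [findRule_neg _ (fun c => PySem.Str.startswith c "dow" || PySem.Str.startswith c "month" || PySem.Str.startswith c "is_" || PySem.Str.startswith c "days_to") _ _ _h7]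
                          rw [findRule_neg _ (fun c => PySem.Str.startswith c "prev_") _ _ _h8]
                          rw [findRule_neg _ (fun c => PySem.Str.startswith c "vix1d" || PySem.Str.startswith c "vix9d" || PySem.Str.startswith c "vvix") _ _ _h9]
                          rw [findRule_neg _ (fun c => PySem.Str.startswith c "net_gex" || PySem.Str.startswith c "call_gex" || PySem.Str.startswith c "put_gex" || PySem.Str.startswith c "net_vex" || PySem.Str.startswith c "gex_") _ _ _h10]
                          rw [findRule_neg _ (fun c => PySem.Str.startswith c "iv_" || PySem.Str.startswith c "gamma_") _ _ _h11]
                          rw [findRule_pos _ (fun c => PySem.Str.startswith c "put_call" || PySem.Str.startswith c "total_oi" || PySem.Str.startswith c "call_wall" || PySem.Str.startswith c "put_wall") _ _ _h12]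
                          rfl
                        case false =>
                          rw [findRule_neg _ (fun c => PySem.Str.startswith c "spx_prev_return") _ _ _h1]
                          rw [findRule_neg _ (fun c => PySem.Str.startswith c "spx_prev_" && !PySem.Str.isIn "return" c) _ _ _h2]
                          rw [findRule_neg _ (fun c => PySem.Str.startswith c "spx_gap") _ _ _h3]
                          rw [findRule_neg _ (fun c => PySem.Str.startswith c "spx_above" || PySem.Str.startswith c "spx_rsi" || PySem.Str.startswith c "spx_dist") _ _ _h4]
                          rw [findRule_neg _ (fun c => PySem.Str.startswith c "vix_prev" || PySem.Str.startswith c "vix_percentile" || PySem.Str.startswith c "vix_zscore" || PySem.Str.startswith c "vix_spx") _ _ _h5]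
                          rw [findRule_neg _ (fun c => PySem.Str.startswith c "realized_vol") _ _ _h6]
                          rw [findRule_neg _ (fun c => PySem.Str.startswith c "dow" || PySem.Str.startswith c "month" || PySem.Str.startswith c "is_" || PySem.Str.startswith c "days_to") _ _ _h7]
                          rw [findRule_neg _ (fun c => PySem.Str.startswith c "prev_") _ _ _h8]
                          rw [findRule_neg _ (fun c => PySem.Str.startswith c "vix1d" || PySem.Str.startswith c "vix9d" || PySem.Str.startswith c "vvix") _ _ _h9]
                          rw [findRule_neg _ (fun c => PySem.Str.startswith c "net_gex" || PySem.Str.startswith c "call_gex" || PySem.Str.startswith c "put_gex" || PySem.Str.startswith c "net_vex" || PySem.Str.startswith c "gex_") _ _ _h10]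
                          rw [findRule_neg _ (fun c => PySem.Str.startswith c "iv_" || PySem.Str.startswith c "gamma_") _ _ _h11]
                          rw [findRule_neg _ (fun c => PySem.Str.startswith c "put_call" || PySem.Str.startswith c "total_oi" || PySem.Str.startswith c "call_wall" || PySem.Str.startswith c "put_wall") _ _ _h12]
                          rfl

theorem pvZipMapSelf (cols : List String) (f : String → String) :
    cols.zip (cols.map f) = cols.map (fun c => (c, f c)) := by
  induction cols with
  | nil => rfl
  | cons c cs ih => simp [ih]

theorem pvFilterMap {α β γ : Type} (cols : List α) (g : α → β) (p : β → Bool) (q : β → γ) :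
    ((cols.map g).filter p).map q = (cols.filter (fun c => p (g c))).map (fun c => q (g c)) := by
  rw [List.filter_map, List.map_map]; rfl

theorem pvGetD_fold (cols : List String) (k : String) :
    (cols.foldl (fun d c => d.modify (pvCategory c) [] (· ++ [c])) (PySem.Dict.empty (κ := String))).getD k []
      = cols.filter (fun c => pvCategory c == k) := by
  have h := (List.foldl_map (f := fun c => (pvCategory c, c))
    (g := fun (d : PySem.Dict String (List String)) p => d.modify p.1 [] fun v => v ++ [p.2])
    (l := cols) (init := PySem.Dict.empty))
  rw [show (cols.foldl (fun d c => d.modify (pvCategory c) [] (· ++ [c])) (PySem.Dict.empty (κ := String)))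
        = ((cols.map (fun c => (pvCategory c, c))).foldl
            (fun d p => d.modify p.1 [] (fun v => v ++ [p.2])) (PySem.Dict.empty (κ := String)))
      from h.symm]
  rw [PySem.Dict.getD_foldl_modify_append]
  rw [pvFilterMap cols (fun c => (pvCategory c, c)) (fun p => p.1 == k) (fun p => p.2)]
  simp [PySem.Dict.getD_empty]

-- ===== VERDICT (by name: the statement is the Claim_ definition above) =====
theorem classify_features_spec : Claim_equal_classify_features := by
  intro cols _
  unfold Spec_classify_features classify_features classify_features_alt
  have hstep : classifyStepA = fun d c => d.modify (pvCategory c) [] (· ++ [c]) :=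
    funext fun d => funext fun c => pvStep_eq d c
  rw [hstep]
  have hnd : (cols.foldl (fun d c => d.modify (pvCategory c) [] (· ++ [c])) (PySem.Dict.empty (κ := String))).keys.Nodup :=
    PySem.Dict.nodup_keys_foldl_modify_key cols pvCategory [] (fun _ c => (· ++ [c])) _ PySem.Dict.nodup_keys_empty
  rw [PySem.Dict.items_eq_map_keys _ hnd []]
  rw [PySem.Dict.keys_foldl_modify_key cols pvCategory [] (fun _ c => (· ++ [c]))]
  rw [PySem.Dict.keys_empty, PySem.Set.update_nil_left, ← PySem.List.dedup_eq_ofList]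
  refine List.map_congr_left (fun k _ => ?_)
  rw [pvGetD_fold cols k, pvZipMapSelf cols pvCategory]
  rw [pvFilterMap cols (fun c => (c, pvCategory c)) (fun p => p.2 == k) (fun p => p.1)]
  simp
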